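-- pv_equiv track=rewrite | github.com/NikeHop/CSRL | src/textworld/utils/prior_kg/conceptnet.py | extract_allowable_classes
-- ===== SOURCE A (Python) =====
-- from collections import defaultdict
--
-- def extract_allowable_classes(class_trees:dict,entities:list)->dict:
--     allowed_classes = defaultdict(lambda :0)
--     for ent, tree in class_trees.items():
--         for key, cls_ in tree.items():
--             for cl in cls_:
--                 allowed_classes[cl]+=1
--
--     allowed_classes = {key:True for key,value in allowed_classes.items() if value>1}
--     allowed_classes.update({ent: True for ent in entities})
--
--     return allowed_classes
-- ===== SOURCE B (Python) =====
-- def extract_allowable_classes(class_trees: dict, entities: list) -> dict: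
--     # sort-then-adjacent-scan: flatten all occurrences, sort them so equal classes are
--     # adjacent, and read the duplicated classes off adjacent equal pairs (no counter dict)
--     occurrences = [cl for tree in class_trees.values() for cls_ in tree.values() for cl in cls_]
--     ordered = sorted(occurrences)
--     duplicated = {ordered[i] for i in range(len(ordered) - 1) if ordered[i] == ordered[i + 1]}
--     result = {cl: True for cl in dict.fromkeys(occurrences) if cl in duplicated}
--     result.update(dict.fromkeys(entities, True))
--     return result
-- ===== Notes on version B (the rewrite author's own statement) =====
-- stated objective: alternative
-- what changed: The incremental occurrence-counter dict built by three nested loops is replaced by sort-then-scan: B flattens all occurrences into one list, sorts it so equal classes become adjacent, reads the duplicated classes off adjacent equal pairs, and keeps each first-occurrence class iff it is in that duplicate set; entities are merged via dict.fromkeys(entities, True).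
import Mathlib
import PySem

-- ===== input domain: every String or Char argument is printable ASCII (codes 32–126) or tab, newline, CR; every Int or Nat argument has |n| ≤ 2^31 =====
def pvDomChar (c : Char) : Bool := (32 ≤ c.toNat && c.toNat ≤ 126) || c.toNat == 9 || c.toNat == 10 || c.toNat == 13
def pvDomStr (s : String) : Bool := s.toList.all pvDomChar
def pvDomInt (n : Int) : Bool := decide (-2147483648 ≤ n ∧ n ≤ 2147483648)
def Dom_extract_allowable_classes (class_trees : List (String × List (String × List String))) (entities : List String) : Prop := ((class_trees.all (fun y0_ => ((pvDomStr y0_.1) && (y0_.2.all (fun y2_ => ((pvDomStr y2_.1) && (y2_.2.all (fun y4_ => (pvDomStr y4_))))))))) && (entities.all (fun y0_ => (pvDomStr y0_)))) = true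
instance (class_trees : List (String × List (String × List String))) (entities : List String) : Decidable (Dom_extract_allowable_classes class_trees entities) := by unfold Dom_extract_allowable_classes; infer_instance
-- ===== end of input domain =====

-- B replaces A's incremental occurrence-counter dict by sort-then-scan: flatten all occurrences,
-- sort, read duplicated classes off adjacent equal pairs (objective: alternative algorithm).


-- ===== PORT A =====
-- A: count every class occurrence with a defaultdict (three nested loops, += 1), keep the keys
-- whose count is > 1 as True, then update with {ent: True for ent in entities}.
def extract_allowable_classes (class_trees : List (String × List (String × List String))) (entities : List String) : List (String × Bool) :=
  let counts : PySem.Dict String Int :=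
    class_trees.foldl (fun d p =>
      p.2.foldl (fun d q =>
        q.2.foldl (fun d cl => d.modify cl 0 (· + 1)) d) d) PySem.Dict.empty
  let allowed : PySem.Dict String Bool :=
    (counts.items.filter (fun kv => decide ((1 : Int) < kv.2))).foldl
      (fun d kv => d.insert kv.1 true) PySem.Dict.empty
  let edict : PySem.Dict String Bool :=
    entities.foldl (fun d e => d.insert e true) PySem.Dict.empty
  (PySem.Dict.update allowed edict.items).items

-- ===== PORT B =====
-- B: flatten all occurrences (comprehension), sort them, collect the classes standing in an
-- adjacent equal pair into a set (indexing via pyGetD: every index i, i+1 is in range by the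
-- range bound, so the default is never read), keep each first-occurrence class (dict.fromkeys)
-- iff it is in that set, then result.update(dict.fromkeys(entities, True)).
def extract_allowable_classes_alt (class_trees : List (String × List (String × List String))) (entities : List String) : List (String × Bool) :=
  let occurrences : List String := class_trees.flatMap (fun p => p.2.flatMap (fun q => q.2))
  let ordered : List String := PySem.List.sorted occurrences id false
  let duplicated : PySem.Set String :=
    PySem.Set.ofList (((PySem.List.pyRange 0 (PySem.List.len ordered - 1) 1).filter
        (fun i => PySem.List.pyGetD ordered i "" == PySem.List.pyGetD ordered (i + 1) "")).map
      (fun i => PySem.List.pyGetD ordered i ""))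
  let result : PySem.Dict String Bool :=
    ((PySem.List.dedup occurrences).filter (fun cl => PySem.Set.contains duplicated cl)).foldl
      (fun d cl => d.insert cl true) PySem.Dict.empty
  (PySem.Dict.update result ((PySem.List.dedup entities).map (fun e => (e, true)))).items

-- ===== PRECONDITION & SPEC =====
def Spec_extract_allowable_classes (class_trees : List (String × List (String × List String))) (entities : List String) (out : List (String × Bool)) : Prop := out = extract_allowable_classes_alt class_trees entities
instance (class_trees : List (String × List (String × List String))) (entities : List String) (out : List (String × Bool)) : Decidable (Spec_extract_allowable_classes class_trees entities out) := by unfold Spec_extract_allowable_classes; infer_instance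

-- ===== CLAIM (what is proved, stated in full; the proofs are below) =====
def Claim_equal_extract_allowable_classes : Prop := ∀ (class_trees : List (String × List (String × List String))) (entities : List String), Dom_extract_allowable_classes class_trees entities → Spec_extract_allowable_classes class_trees entities (extract_allowable_classes class_trees entities)

-- ===== LEMMAS AND PROOFS =====

-- A's nested three-level loop over class_trees is a fold over the flattened occurrence list
theorem foldl_trees_flatten {α : Type} (g : α → String → α)
    (l : List (String × List (String × List String))) (a : α) :
    l.foldl (fun a p => p.2.foldl (fun a q => q.2.foldl g a) a) a
      = (l.flatMap (fun p => p.2.flatMap (fun q => q.2))).foldl g a := by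
  induction l generalizing a with
  | nil => rfl
  | cons p t ih =>
    simp only [List.foldl_cons, List.flatMap_cons, List.foldl_append, ih]
    congr 1
    induction p.2 generalizing a with
    | nil => rfl
    | cons q t2 ih2 => simp only [List.foldl_cons, List.flatMap_cons, List.foldl_append, ih2]

-- A's entity dict {ent: True for ent in entities}, as items: first occurrences paired with true
theorem entity_dict_items (l : List String) :
    (l.foldl (fun d e => d.insert e true) (PySem.Dict.empty : PySem.Dict String Bool)).items
      = (PySem.List.dedup l).map (fun e => (e, true)) := by
  induction l using List.reverseRecOn with
  | nil => rfl
  | append_singleton t x ih =>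
    rw [List.foldl_append, List.foldl_cons, List.foldl_nil]
    have hkeys : (t.foldl (fun d e => d.insert e true)
        (PySem.Dict.empty : PySem.Dict String Bool)).keys = PySem.Set.ofList t := by
      rw [PySem.Dict.keys_foldl_insert]
      simp [PySem.Set.update_nil_left, PySem.Dict.keys_empty]
    by_cases hx : x ∈ PySem.Set.ofList t
    · have hc : (t.foldl (fun d e => d.insert e true)
          (PySem.Dict.empty : PySem.Dict String Bool)).contains x = true := by
        rw [PySem.Dict.contains_iff_mem_keys, hkeys]; exact hx
      rw [PySem.Dict.items_insert_of_contains _ _ hc, ih]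
      have hded : PySem.List.dedup (t ++ [x]) = PySem.List.dedup t := by
        simp only [PySem.List.dedup_eq_ofList, PySem.Set.ofList_append_singleton,
          PySem.Set.add_of_mem hx]
      rw [hded, List.map_map]
      refine List.map_congr_left ?_
      intro e _
      by_cases hex : e = x
      · subst hex; simp
      · simp [Function.comp, hex]
    · have hc : (t.foldl (fun d e => d.insert e true)
          (PySem.Dict.empty : PySem.Dict String Bool)).contains x = false := by
        rw [← Bool.not_eq_true, PySem.Dict.contains_iff_mem_keys, hkeys]; exact hx
      rw [PySem.Dict.items_insert_of_not_contains _ _ hc, ih]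
      simp only [PySem.List.dedup_eq_ofList, PySem.Set.ofList_append_singleton,
        PySem.Set.add_of_not_mem hx, List.map_append, List.map_cons, List.map_nil]

-- in a (≤)-sorted list an element occurs at least twice iff it stands in an adjacent equal pair
theorem adj_pair_iff_two_le_count (s : List String) (hs : s.Pairwise (· ≤ ·)) (cl : String) :
    (∃ i : Nat, i + 1 < s.length ∧ s[i]? = some cl ∧ s[i + 1]? = some cl)
      ↔ 2 ≤ s.count cl := by
  induction s with
  | nil => simp
  | cons x t ih =>
    rcases List.pairwise_cons.mp hs with ⟨hxle, ht⟩
    by_cases hx : x = cl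
    · subst hx
      have hcnt : (x :: t).count x = t.count x + 1 := List.count_cons_self
      constructor
      · rintro ⟨i, hi, h1, h2⟩
        match i with
        | 0 =>
          simp only [List.getElem?_cons_succ] at h2
          have : x ∈ t := List.mem_of_getElem? h2
          have : 1 ≤ t.count x := List.one_le_count_iff.mpr this
          omega
        | j + 1 =>
          simp only [List.getElem?_cons_succ] at h1
          have : x ∈ t := List.mem_of_getElem? h1
          have : 1 ≤ t.count x := List.one_le_count_iff.mpr this
          omega
      · intro h
        have hmem : x ∈ t := by
          by_contra hmem
          have : t.count x = 0 := List.count_eq_zero.mpr hmem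
          omega
        -- t is sorted with all elements ≥ x and contains x, so its head is x
        obtain ⟨y, tt, rfl⟩ : ∃ y tt, t = y :: tt := by
          cases t with
          | nil => simp at hmem
          | cons y tt => exact ⟨y, tt, rfl⟩
        have hyx : y = x := by
          rcases List.mem_cons.mp hmem with h | h
          · exact h.symm
          · have h1 : x ≤ y := hxle y List.mem_cons_self
            have h2 : y ≤ x := (List.pairwise_cons.mp ht).1 x h
            exact le_antisymm h2 h1
        exact ⟨0, by simp, by simp, by simp [hyx]⟩
    · have hcnt : (x :: t).count cl = t.count cl := List.count_cons_of_ne (show x ≠ cl from hx)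
      rw [hcnt, ← ih ht]
      constructor
      · rintro ⟨i, hi, h1, h2⟩
        match i with
        | 0 => simp only [List.getElem?_cons_zero, Option.some.injEq] at h1; exact absurd h1 hx
        | j + 1 =>
          refine ⟨j, by simpa using hi, ?_, ?_⟩
          · simpa [List.getElem?_cons_succ] using h1
          · simpa [List.getElem?_cons_succ] using h2
      · rintro ⟨j, hj, h1, h2⟩
        exact ⟨j + 1, by simpa using hj, by simpa using h1, by simpa using h2⟩

-- membership in B's duplicate set is exactly A's 'count > 1'
theorem contains_duplicated_eq (occ : List String) (cl : String) :
    PySem.Set.contains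
      (PySem.Set.ofList
        (((PySem.List.pyRange 0 (PySem.List.len (PySem.List.sorted occ id false) - 1) 1).filter
            (fun i => PySem.List.pyGetD (PySem.List.sorted occ id false) i ""
              == PySem.List.pyGetD (PySem.List.sorted occ id false) (i + 1) "")).map
          (fun i => PySem.List.pyGetD (PySem.List.sorted occ id false) i ""))) cl
      = decide ((1 : Int) < (occ.count cl : Int)) := by
  set s := PySem.List.sorted occ id false with hsdef
  have hperm : s.Perm occ := PySem.List.sorted_perm occ id false
  have hpair : s.Pairwise (· ≤ ·) := by
    simpa using PySem.List.sorted_pairwise occ id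
  rw [Bool.eq_iff_iff]
  rw [PySem.Set.contains_iff, PySem.Set.mem_ofList, decide_eq_true_iff]
  have hcount : occ.count cl = s.count cl := (hperm.count_eq cl).symm
  constructor
  · rintro hmem
    rcases List.mem_map.mp hmem with ⟨i, hif, rfl⟩
    rcases List.mem_filter.mp hif with ⟨hir, heq⟩
    rcases (PySem.List.mem_pyRange_one).mp hir with ⟨h0, hlt⟩
    simp only [PySem.List.len_eq] at hlt
    have hiN : i.toNat + 1 < s.length := by omega
    have hgi : PySem.List.pyGetD s i "" = s[i.toNat] :=
      PySem.List.pyGetD_eq_getElem s "" h0 (by omega)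
    have hgi1 : PySem.List.pyGetD s (i + 1) "" = s[i.toNat + 1] := by
      have := PySem.List.pyGetD_eq_getElem s (i := i + 1) "" (by omega)
        (by omega)
      simpa [Int.toNat_add h0] using this
    have heq' : s[i.toNat] = s[i.toNat + 1] := by
      have := of_decide_eq_true (by simpa [beq_iff_eq] using heq)
      rwa [hgi, hgi1] at this
    have h2 : 2 ≤ s.count (PySem.List.pyGetD s i "") := by
      refine (adj_pair_iff_two_le_count s hpair _).mp ⟨i.toNat, hiN, ?_, ?_⟩
      · rw [List.getElem?_eq_getElem (by omega), hgi]
      · rw [List.getElem?_eq_getElem hiN, hgi, heq']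
    rw [hcount]; exact_mod_cast h2
  · intro hlt
    have h2 : 2 ≤ s.count cl := by rw [hcount] at hlt; exact_mod_cast hlt
    rcases (adj_pair_iff_two_le_count s hpair cl).mpr h2 with ⟨i, hi, h1, h2'⟩
    have hg1 : s[i] = cl := by
      have := List.getElem?_eq_getElem (l := s) (i := i) (by omega)
      rw [this] at h1; exact Option.some.inj h1
    have hg2 : s[i + 1] = cl := by
      have := List.getElem?_eq_getElem (l := s) (i := i + 1) hi
      rw [this] at h2'; exact Option.some.inj h2'
    refine List.mem_map.mpr ⟨(i : Int), List.mem_filter.mpr ⟨?_, ?_⟩, ?_⟩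
    · refine (PySem.List.mem_pyRange_one).mpr ⟨by omega, ?_⟩
      simp only [PySem.List.len_eq]; omega
    · have hgi : PySem.List.pyGetD s (i : Int) "" = s[i] :=
        PySem.List.pyGetD_eq_getElem s (i := (i : Int)) "" (by omega) (by omega)
      have hgi1 : PySem.List.pyGetD s ((i : Int) + 1) "" = s[i + 1] := by
        have := PySem.List.pyGetD_eq_getElem s (i := (i : Int) + 1) "" (by omega)
          (by omega)
        simpa using this
      rw [hgi, hgi1, hg1, hg2]; simp
    · have hgi : PySem.List.pyGetD s (i : Int) "" = s[i] :=
        PySem.List.pyGetD_eq_getElem s (i := (i : Int)) "" (by omega) (by omega)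
      rw [hgi, hg1]

-- ===== VERDICT (by name: the statement is the Claim_ definition above) =====
theorem extract_allowable_classes_spec : Claim_equal_extract_allowable_classes := by
  intro ct ents _
  unfold Spec_extract_allowable_classes extract_allowable_classes extract_allowable_classes_alt
  dsimp only []
  rw [foldl_trees_flatten, ← PySem.Dict.counter_eq_foldl, PySem.Dict.items_counter,
    List.filter_map, List.foldl_map, entity_dict_items]
  simp only [PySem.List.dedup_eq_ofList, Function.comp_def]
  congr 2
  refine congrArg (List.foldl _ _) (List.filter_congr ?_)
  intro cl _
  rw [contains_duplicated_eq]
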